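-- pv_equiv track=rewrite | github.com/alisonhau/10-301 | hw4/handout/tagger.py | parse_model_one
-- ===== SOURCE A (Python) =====
-- def parse_model_one(train_info):
--   x = []
--   y = []
--   label_dict = {}
--   word_dict = {}
--   for elems in train_info:
--     #checks non-empty
--     if elems:
--       if elems[1] not in label_dict:
--         y.append(len(label_dict))
--         label_dict[elems[1]] = len(label_dict)
--       else:
--         y.append(label_dict[elems[1]])
--       if elems[0] not in word_dict:
--         x.append(len(word_dict) + 1)
--         word_dict[elems[0]] = len(word_dict) + 1
--       else:
--         x.append(word_dict[elems[0]])
--   k = len(label_dict) # unique labels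
--   m = len(word_dict)  # unique words
--   theta = [[0 for i in range(m+2)] for j in range(k+1)]
--   return word_dict, label_dict, x, y, theta
-- ===== SOURCE B (Python) =====
-- def parse_model_one(train_info):
--     # Phase 1: build the vocabularies in first-appearance order.
--     label_dict = {}
--     word_dict = {}
--     for elems in train_info:
--         if elems:
--             if elems[1] not in label_dict:
--                 label_dict[elems[1]] = len(label_dict)
--             if elems[0] not in word_dict:
--                 word_dict[elems[0]] = len(word_dict) + 1
--     # Phase 2: encode the sequences against the finished vocabularies.
--     x = [word_dict[elems[0]] for elems in train_info if elems]
--     y = [label_dict[elems[1]] for elems in train_info if elems]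
--     k = len(label_dict)
--     m = len(word_dict)
--     theta = [[0] * (m + 2) for _ in range(k + 1)]
--     return word_dict, label_dict, x, y, theta
-- ===== Notes on version B (the rewrite author's own statement) =====
-- stated objective: simpler
-- what changed: B separates vocabulary construction from sequence encoding: a first pass builds the two index dicts, then list comprehensions over the finished dicts produce x and y (correct because an index assigned at first insertion never changes), and theta is built by list repetition instead of nested range loops.
import Mathlib
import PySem

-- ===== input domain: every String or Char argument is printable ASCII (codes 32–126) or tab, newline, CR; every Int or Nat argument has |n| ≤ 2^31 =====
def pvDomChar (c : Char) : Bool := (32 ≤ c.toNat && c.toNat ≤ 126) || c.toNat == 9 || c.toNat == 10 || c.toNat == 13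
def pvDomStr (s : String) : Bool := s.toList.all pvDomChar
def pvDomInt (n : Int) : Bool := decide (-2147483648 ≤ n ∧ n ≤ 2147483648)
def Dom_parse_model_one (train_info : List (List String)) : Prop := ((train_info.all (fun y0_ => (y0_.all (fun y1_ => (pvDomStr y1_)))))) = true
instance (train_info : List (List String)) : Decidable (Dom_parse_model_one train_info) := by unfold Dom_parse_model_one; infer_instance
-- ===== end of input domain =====

-- ===== PORT A =====
-- B does the same job in two phases (build vocabularies, then encode); comments claim only the proved equality.
-- A-side: one pass carrying (label_dict, word_dict, x, y); elems[i] ported exactly via pyGet? (Pre_ keeps indexing in range).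
def pmoStepA (st : PySem.Dict String Int × PySem.Dict String Int × List Int × List Int)
    (elems : List String) : PySem.Dict String Int × PySem.Dict String Int × List Int × List Int :=
  if elems = [] then st
  else
    let ld := st.1; let wd := st.2.1; let x := st.2.2.1; let y := st.2.2.2
    let e1 := (PySem.List.pyGet? elems 1).getD ""
    let e0 := (PySem.List.pyGet? elems 0).getD ""
    let y' := if ld.contains e1 then y ++ [ld.getD e1 0] else y ++ [(ld.size : Int)]
    let ld' := if ld.contains e1 then ld else ld.insert e1 (ld.size : Int)
    let x' := if wd.contains e0 then x ++ [wd.getD e0 0] else x ++ [(wd.size : Int) + 1]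
    let wd' := if wd.contains e0 then wd else wd.insert e0 ((wd.size : Int) + 1)
    (ld', wd', x', y')

def parse_model_one (train_info : List (List String)) : (List (String × Int)) × (List (String × Int)) × List Int × List Int × List (List Int) :=
  let st := train_info.foldl pmoStepA (PySem.Dict.empty, PySem.Dict.empty, [], [])
  let ld := st.1; let wd := st.2.1; let x := st.2.2.1; let y := st.2.2.2
  let k := ld.size
  let m := wd.size
  let theta := (List.range (k + 1)).map (fun _ => (List.range (m + 2)).map (fun _ => (0 : Int)))
  (wd.items, ld.items, x, y, theta)

-- ===== PORT B =====
-- B-side phase 1: insert-if-absent vocabulary building only.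
def pmoInsL (ld : PySem.Dict String Int) (elems : List String) : PySem.Dict String Int :=
  if elems = [] then ld
  else
    let e1 := (PySem.List.pyGet? elems 1).getD ""
    if ld.contains e1 then ld else ld.insert e1 (ld.size : Int)

def pmoInsW (wd : PySem.Dict String Int) (elems : List String) : PySem.Dict String Int :=
  if elems = [] then wd
  else
    let e0 := (PySem.List.pyGet? elems 0).getD ""
    if wd.contains e0 then wd else wd.insert e0 ((wd.size : Int) + 1)

def parse_model_one_alt (train_info : List (List String)) : (List (String × Int)) × (List (String × Int)) × List Int × List Int × List (List Int) :=
  let ld := train_info.foldl pmoInsL PySem.Dict.empty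
  let wd := train_info.foldl pmoInsW PySem.Dict.empty
  let x := (train_info.filter (fun e => e ≠ [])).map (fun e => wd.getD ((PySem.List.pyGet? e 0).getD "") 0)
  let y := (train_info.filter (fun e => e ≠ [])).map (fun e => ld.getD ((PySem.List.pyGet? e 1).getD "") 0)
  let k := ld.size
  let m := wd.size
  let theta := List.replicate (k + 1) (List.replicate (m + 2) (0 : Int))
  (wd.items, ld.items, x, y, theta)

-- ===== PRECONDITION & SPEC =====
-- Pre_ excludes exactly the inputs where Python A raises IndexError: a non-empty row with fewer than 2 fields.
def Pre_parse_model_one (train_info : List (List String)) : Prop :=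
  ∀ e ∈ train_info, e ≠ [] → 2 ≤ e.length

instance (train_info : List (List String)) : Decidable (Pre_parse_model_one train_info) := by
  unfold Pre_parse_model_one; infer_instance

def pvWitness_parse_model_one : List (List String) := [["the", "D"], ["cat", "N"], ["the", "D"], []]

def Spec_parse_model_one (train_info : List (List String)) (out : (List (String × Int)) × (List (String × Int)) × List Int × List Int × List (List Int)) : Prop := out = parse_model_one_alt train_info
instance (train_info : List (List String)) (out : (List (String × Int)) × (List (String × Int)) × List Int × List Int × List (List Int)) : Decidable (Spec_parse_model_one train_info out) := by unfold Spec_parse_model_one; infer_instance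

-- ===== CLAIM (what is proved, stated in full; the proofs are below) =====
def Claim_equal_parse_model_one : Prop := ∀ (train_info : List (List String)), Dom_parse_model_one train_info → Pre_parse_model_one train_info → Spec_parse_model_one train_info (parse_model_one train_info)

-- ===== LEMMAS AND PROOFS =====

-- Values of keys already present are never changed by the insert-if-absent folds.
lemma pmo_stableL (l : List (List String)) (ld : PySem.Dict String Int) (k : String)
    (h : ld.contains k = true) :
    (l.foldl pmoInsL ld).contains k = true ∧ (l.foldl pmoInsL ld).getD k 0 = ld.getD k 0 := by
  induction l generalizing ld with
  | nil => exact ⟨h, rfl⟩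
  | cons e t ih =>
    simp only [List.foldl_cons]
    by_cases he : e = []
    · rw [show pmoInsL ld e = ld by simp [pmoInsL, he]]; exact ih ld h
    · by_cases hc : ld.contains ((PySem.List.pyGet? e 1).getD "")
      · rw [show pmoInsL ld e = ld by simp [pmoInsL, he, hc]]; exact ih ld h
      · rw [show pmoInsL ld e = ld.insert ((PySem.List.pyGet? e 1).getD "") (ld.size : Int) by
          simp [pmoInsL, he, hc]]
        have hk : k ≠ (PySem.List.pyGet? e 1).getD "" := by
          intro heq; rw [heq] at h; simp [h] at hc
        obtain ⟨h1, h2⟩ := ih (ld.insert ((PySem.List.pyGet? e 1).getD "") (ld.size : Int))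
          (by simp [PySem.Dict.contains_insert, h])
        exact ⟨h1, by rw [h2, PySem.Dict.getD_insert_of_ne _ _ _ hk]⟩

lemma pmo_stableW (l : List (List String)) (wd : PySem.Dict String Int) (k : String)
    (h : wd.contains k = true) :
    (l.foldl pmoInsW wd).contains k = true ∧ (l.foldl pmoInsW wd).getD k 0 = wd.getD k 0 := by
  induction l generalizing wd with
  | nil => exact ⟨h, rfl⟩
  | cons e t ih =>
    simp only [List.foldl_cons]
    by_cases he : e = []
    · rw [show pmoInsW wd e = wd by simp [pmoInsW, he]]; exact ih wd h
    · by_cases hc : wd.contains ((PySem.List.pyGet? e 0).getD "")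
      · rw [show pmoInsW wd e = wd by simp [pmoInsW, he, hc]]; exact ih wd h
      · rw [show pmoInsW wd e = wd.insert ((PySem.List.pyGet? e 0).getD "") ((wd.size : Int) + 1) by
          simp [pmoInsW, he, hc]]
        have hk : k ≠ (PySem.List.pyGet? e 0).getD "" := by
          intro heq; rw [heq] at h; simp [h] at hc
        obtain ⟨h1, h2⟩ := ih (wd.insert ((PySem.List.pyGet? e 0).getD "") ((wd.size : Int) + 1))
          (by simp [PySem.Dict.contains_insert, h])
        exact ⟨h1, by rw [h2, PySem.Dict.getD_insert_of_ne _ _ _ hk]⟩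

-- A's single pass equals B's phases, from any intermediate state.
lemma pmo_main (l : List (List String)) (ld wd : PySem.Dict String Int) (x y : List Int) :
    l.foldl pmoStepA (ld, wd, x, y) =
      (l.foldl pmoInsL ld, l.foldl pmoInsW wd,
       x ++ (l.filter (fun e => e ≠ [])).map
             (fun e => (l.foldl pmoInsW wd).getD ((PySem.List.pyGet? e 0).getD "") 0),
       y ++ (l.filter (fun e => e ≠ [])).map
             (fun e => (l.foldl pmoInsL ld).getD ((PySem.List.pyGet? e 1).getD "") 0)) := by
  induction l generalizing ld wd x y with
  | nil => simp
  | cons e t ih =>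
    by_cases he : e = []
    · subst he
      simp only [List.foldl_cons, pmoStepA, pmoInsL, pmoInsW]
      simpa using ih ld wd x y
    · have hfil : (e :: t).filter (fun e => e ≠ []) = e :: t.filter (fun e => e ≠ []) := by
        simp [he]
      set e1 := (PySem.List.pyGet? e 1).getD "" with he1
      set e0 := (PySem.List.pyGet? e 0).getD "" with he0
      -- one step of A
      have hstep : pmoStepA (ld, wd, x, y) e =
          (pmoInsL ld e, pmoInsW wd e,
           x ++ [(pmoInsW wd e).getD e0 0], y ++ [(pmoInsL ld e).getD e1 0]) := by
        simp only [pmoStepA, pmoInsL, pmoInsW, if_neg he]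
        by_cases hcl : ld.contains e1 <;> by_cases hcw : wd.contains e0 <;>
          simp [hcl, hcw, PySem.Dict.getD_insert_self, ← he1, ← he0]
      have hcl1 : (pmoInsL ld e).contains e1 = true := by
        simp only [pmoInsL, if_neg he, ← he1]
        split
        · assumption
        · exact PySem.Dict.contains_insert_self _ _ _
      have hcw1 : (pmoInsW wd e).contains e0 = true := by
        simp only [pmoInsW, if_neg he, ← he0]
        split
        · assumption
        · exact PySem.Dict.contains_insert_self _ _ _
      simp only [List.foldl_cons, hstep, hfil, List.map_cons]
      rw [ih]
      rw [(pmo_stableW t (pmoInsW wd e) e0 hcw1).2, (pmo_stableL t (pmoInsL ld e) e1 hcl1).2]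
      simp [List.append_assoc]

-- ===== VERDICT (by name: the statement is the Claim_ definition above) =====
theorem parse_model_one_spec : Claim_equal_parse_model_one := by
  intro train_info _ _
  unfold Spec_parse_model_one parse_model_one parse_model_one_alt
  rw [pmo_main]
  simp [List.map_const']
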